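-- pv_equiv track=rewrite | github.com/behappyyoung/PythonSampleCodes | Algorithm/BitManipulations/Different-Bits-Sum-Pairwise.py | different_bits_sum_s_s
-- ===== SOURCE A (Python) =====
-- def different_bits_sum_s_s(arr):
--     total_sum = 0
--     total_num_arr = len(arr)
--
--     for i in range(32):
--         total_one = 0
--         for j in range(total_num_arr):
--
--             if arr[j] & (1<<i) != 0:
--                 total_one += 1
--         total_sum += total_one * (total_num_arr - total_one) *2
--
--     return total_sum
-- ===== SOURCE B (Python) =====
-- def different_bits_sum_s_s(arr):
--     # Direct all-ordered-pairs sum of differing low-32 bits.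
--     total = 0
--     for a in arr:
--         for b in arr:
--             total += ((a ^ b) & 0xFFFFFFFF).bit_count()
--     return total
-- ===== Notes on version B (the rewrite author's own statement) =====
-- stated objective: alternative
-- what changed: Replaced the per-bit tally (count set bits per position, then ones*(n-ones)*2) by the direct all-ordered-pairs popcount of (a^b)&0xFFFFFFFF.
import Mathlib
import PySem

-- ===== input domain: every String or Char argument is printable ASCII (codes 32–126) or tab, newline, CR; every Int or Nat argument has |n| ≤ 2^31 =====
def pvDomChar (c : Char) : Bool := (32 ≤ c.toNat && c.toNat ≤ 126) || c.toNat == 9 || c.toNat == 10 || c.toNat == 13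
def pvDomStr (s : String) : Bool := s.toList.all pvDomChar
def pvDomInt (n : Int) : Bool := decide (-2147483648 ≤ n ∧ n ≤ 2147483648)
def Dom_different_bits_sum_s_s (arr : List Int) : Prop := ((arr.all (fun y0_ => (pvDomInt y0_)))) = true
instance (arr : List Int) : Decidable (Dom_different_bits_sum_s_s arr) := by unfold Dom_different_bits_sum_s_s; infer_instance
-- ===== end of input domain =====

-- B replaces A's per-bit tally (ones per position, then ones*(n-ones)*2) by the direct
-- all-ordered-pairs popcount of (a ^ b) & 0xFFFFFFFF: an alternative decomposition, not faster.

-- ===== PORT A =====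
def different_bits_sum_s_s (arr : List Int) : Int :=
  (List.range 32).foldl
    (fun (total_sum : Int) (i : Nat) =>
      let total_one : Int :=
        (PySem.List.pyRange 0 (arr.length : Int) 1).foldl
          (fun total_one j =>
            if PySem.Int.band (PySem.List.pyGetD arr j 0) ((1:Int) <<< i) ≠ 0 then total_one + 1
            else total_one)
          0
      total_sum + total_one * ((arr.length : Int) - total_one) * 2)
    0

-- ===== PORT B =====
def different_bits_sum_s_s_alt (arr : List Int) : Int :=
  arr.foldl
    (fun total a =>
      arr.foldl
        (fun total b =>
          total + (PySem.Int.bitCount (PySem.Int.band (PySem.Int.bxor a b) 4294967295) : Int))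
        total)
    0


-- ===== PRECONDITION & SPEC =====
def Spec_different_bits_sum_s_s (arr : List Int) (out : Int) : Prop := out = different_bits_sum_s_s_alt arr
instance (arr : List Int) (out : Int) : Decidable (Spec_different_bits_sum_s_s arr out) := by unfold Spec_different_bits_sum_s_s; infer_instance

-- ===== CLAIM (what is proved, stated in full; the proofs are below) =====
def Claim_equal_different_bits_sum_s_s : Prop := ∀ (arr : List Int), Dom_different_bits_sum_s_s arr → Spec_different_bits_sum_s_s arr (different_bits_sum_s_s arr)

-- ===== LEMMAS AND PROOFS =====

def pvBit (x : Int) (i : Nat) : Bool :=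
  if 0 ≤ x then x.toNat.testBit i else !((-x - 1).toNat.testBit i)
theorem pv_one_shiftLeft (i : Nat) : ((1:Int) <<< i) = ((2 ^ i : Nat) : Int) := by
  simp [Int.shiftLeft_eq]
theorem pv_band_two_pow (x : Int) (i : Nat) :
    (PySem.Int.band x ((1:Int) <<< i) ≠ 0) ↔ pvBit x i = true := by
  rw [pv_one_shiftLeft]
  by_cases h : 0 ≤ x
  · have h2 : (0:Int) ≤ ((2 ^ i : Nat) : Int) := by positivity
    rw [PySem.Int.band_of_nonneg h h2]
    simp only [pvBit, if_pos h, Int.toNat_natCast]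
    rw [Nat.and_two_pow]
    cases hb : x.toNat.testBit i <;> simp
  · have h2 : (0:Int) ≤ ((2 ^ i : Nat) : Int) := by positivity
    simp only [PySem.Int.band, if_neg h, if_pos h2, pvBit]
    rw [Int.toNat_natCast, Nat.two_pow_and]
    cases hb : (-x-1).toNat.testBit i <;> simp

theorem pvBit_natCast (n : Nat) (i : Nat) : pvBit (n : Int) i = n.testBit i := by
  simp [pvBit]
theorem pvBit_negSucc' (w : Nat) (i : Nat) : pvBit (-(w:Int) - 1) i = !(w.testBit i) := by
  have h : ¬ (0:Int) ≤ -(w:Int) - 1 := by omega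
  simp only [pvBit, if_neg h]
  norm_num
theorem pv_bxor_bit (a b : Int) (i : Nat) :
    pvBit (PySem.Int.bxor a b) i = (pvBit a i != pvBit b i) := by
  by_cases ha : 0 ≤ a <;> by_cases hb : 0 ≤ b
  · simp only [PySem.Int.bxor, if_pos ha, if_pos hb]
    simp [pvBit, ha, hb, Nat.testBit_xor, Bool.bne_eq_xor]
  · simp only [PySem.Int.bxor, if_pos ha, if_neg hb]
    rw [pvBit_negSucc']
    simp only [pvBit, if_pos ha, if_neg hb, Nat.testBit_xor]
    cases a.toNat.testBit i <;> cases ((-b-1).toNat.testBit i) <;> rfl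
  · simp only [PySem.Int.bxor, if_neg ha, if_pos hb]
    rw [pvBit_negSucc']
    simp only [pvBit, if_pos hb, if_neg ha, Nat.testBit_xor]
    cases b.toNat.testBit i <;> cases ((-a-1).toNat.testBit i) <;> rfl
  · simp only [PySem.Int.bxor, if_neg ha, if_neg hb]
    rw [pvBit_natCast]
    simp only [pvBit, if_neg ha, if_neg hb, Nat.testBit_xor]
    cases ((-a-1).toNat.testBit i) <;> cases ((-b-1).toNat.testBit i) <;> rfl

theorem pv_testBit_compl (k : Nat) : ∀ v : Nat, v < 2 ^ k → ∀ i : Nat, i < k →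
    (2 ^ k - 1 - v).testBit i = !v.testBit i := by
  induction k with
  | zero => intro v hv i hi; omega
  | succ k ih =>
    intro v hv i hi
    cases i with
    | zero =>
      have h2 : 2 ^ (k+1) = 2 * 2 ^ k := by ring
      simp only [Nat.testBit_zero]
      have : (2 ^ (k+1) - 1 - v) % 2 = 1 - v % 2 := by omega
      rw [this]
      rcases Nat.mod_two_eq_zero_or_one v with h | h <;> simp [h]
    | succ i =>
      simp only [Nat.testBit_add_one]
      have h2 : 2 ^ (k+1) = 2 * 2 ^ k := by ring
      have hdiv : (2 ^ (k+1) - 1 - v) / 2 = 2 ^ k - 1 - v / 2 := by omega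
      rw [hdiv]
      exact ih (v / 2) (by omega) i (by omega)

theorem pv_bitCount_sum (k : Nat) : ∀ n : Nat, n < 2 ^ k →
    (PySem.Int.bitCount (n : Int) : Int)
      = ((List.range k).map (fun i => if n.testBit i then (1:Int) else 0)).sum := by
  induction k with
  | zero =>
    intro n hn
    have : n = 0 := by omega
    simp [this, PySem.Int.bitCount_zero]
  | succ k ih =>
    intro n hn
    rcases Nat.eq_zero_or_pos n with h0 | h0
    · subst h0
      simp [PySem.Int.bitCount_zero]
    · rw [PySem.Int.bitCount_natCast h0, List.range_succ_eq_map]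
      simp only [List.map_cons, List.map_map, List.sum_cons]
      have hbits : ((List.range k).map (fun i => if n.testBit (i+1) then (1:Int) else 0)).sum
          = ((List.range k).map (fun i => if (n/2).testBit i then (1:Int) else 0)).sum := by
        congr 1
        exact List.map_congr_left (fun i _ => by rw [Nat.testBit_add_one])
      have h2 : 2 ^ (k+1) = 2 * 2 ^ k := by ring
      have hb0 : (if n.testBit 0 = true then (1:Int) else 0) = ((n % 2 : Nat) : Int) := by
        simp only [Nat.testBit_zero]
        rcases Nat.mod_two_eq_zero_or_one n with h | h <;> simp [h]
      rw [show ((fun i => if n.testBit i = true then (1:Int) else 0) ∘ Nat.succ)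
            = (fun i => if n.testBit (i+1) = true then (1:Int) else 0) from rfl, hbits,
          ← ih (n/2) (by omega), hb0]
      push_cast
      ring

theorem pv_popcount_spread (z : Int) :
    (PySem.Int.bitCount (PySem.Int.band z 4294967295) : Int)
      = ((List.range 32).map (fun i => if pvBit z i then (1:Int) else 0)).sum := by
  have hm : (4294967295 : Int) = ((4294967295 : Nat) : Int) := by norm_num
  have hm2 : (4294967295 : Nat) = 2 ^ 32 - 1 := by norm_num
  by_cases h : 0 ≤ z
  · rw [hm, PySem.Int.band_of_nonneg h (by positivity), Int.toNat_natCast, hm2,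
        Nat.and_two_pow_sub_one_eq_mod,
        pv_bitCount_sum 32 _ (Nat.mod_lt _ (by norm_num))]
    congr 1
    refine List.map_congr_left (fun i hi => ?_)
    rw [List.mem_range] at hi
    rw [Nat.testBit_mod_two_pow]
    simp [hi, pvBit, h]
  · rw [hm]
    rw [show PySem.Int.band z ((4294967295 : Nat) : Int)
        = ((4294967295 - (4294967295 &&& (-z - 1).toNat) : Nat) : Int) from by
      simp only [PySem.Int.band, if_neg h, if_pos (by positivity : (0:Int) ≤ ((4294967295:Nat):Int)),
        Int.toNat_natCast]]
    rw [show (4294967295 &&& (-z - 1).toNat : Nat) = (-z - 1).toNat % 2 ^ 32 from by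
      rw [Nat.and_comm, hm2, Nat.and_two_pow_sub_one_eq_mod]]
    have hv : (-z - 1).toNat % 2 ^ 32 < 2 ^ 32 := Nat.mod_lt _ (by norm_num)
    rw [show (4294967295 - (-z - 1).toNat % 2 ^ 32 : Nat) = 2 ^ 32 - 1 - (-z - 1).toNat % 2 ^ 32 from by omega]
    rw [pv_bitCount_sum 32 _ (by omega)]
    congr 1
    refine List.map_congr_left (fun i hi => ?_)
    rw [List.mem_range] at hi
    rw [pv_testBit_compl 32 _ hv i hi, Nat.testBit_mod_two_pow]
    simp [hi, pvBit, h]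

theorem pv_sum_ite (p : Int → Bool) (A B : Int) : ∀ l : List Int,
    (l.map (fun a => if p a then A else B)).sum
      = (l.countP p : Int) * A + ((l.length : Int) - (l.countP p : Int)) * B := by
  intro l
  induction l with
  | nil => simp
  | cons x l ih =>
    cases hp : p x <;>
      simp only [List.map_cons, List.sum_cons, ih, List.countP_cons, List.length_cons, hp] <;>
      push_cast <;> simp <;> ring

theorem pv_sum_swap {α β : Type} (f : α → β → Int) : ∀ (l : List α) (r : List β),
    (l.map (fun a => (r.map (fun b => f a b)).sum)).sum
      = (r.map (fun b => (l.map (fun a => f a b)).sum)).sum := by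
  intro l r
  induction l with
  | nil => simp
  | cons x l ih =>
    simp only [List.map_cons, List.sum_cons, ih, ← PySem.List.sum_map_add_int]

theorem pv_countP_not (l : List Int) (p : Int → Bool) :
    l.countP (fun x => !p x) = l.length - l.countP p := by
  have h1 := List.length_eq_countP_add_countP p (l := l)
  have h2 : l.countP (fun a => decide ¬p a = true) = l.countP (fun x => !p x) :=
    List.countP_congr (fun x _ => by simp)
  omega

theorem pv_main (arr : List Int) : different_bits_sum_s_s arr = different_bits_sum_s_s_alt arr := by
  have hA : different_bits_sum_s_s arr
      = ((List.range 32).map (fun i =>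
          (↑(arr.countP (fun x => pvBit x i)) : Int)
            * ((arr.length : Int) - ↑(arr.countP (fun x => pvBit x i))) * 2)).sum := by
    unfold different_bits_sum_s_s
    have hinner : ∀ i : Nat,
        (PySem.List.pyRange 0 (arr.length : Int) 1).foldl
          (fun total_one j =>
            if PySem.Int.band (PySem.List.pyGetD arr j 0) ((1:Int) <<< i) ≠ 0 then total_one + 1
            else total_one) 0
        = (↑(arr.countP (fun x => pvBit x i)) : Int) := by
      intro i
      rw [PySem.List.foldl_pyRange_zero_pyGetD' arr 0
        (fun total_one x => if PySem.Int.band x ((1:Int) <<< i) ≠ 0 then total_one + 1 else total_one) 0]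
      have hfun : (fun (total_one : Int) (x : Int) =>
            if PySem.Int.band x ((1:Int) <<< i) ≠ 0 then total_one + 1 else total_one)
          = (fun total_one x => if (fun x => pvBit x i) x = true then total_one + 1 else total_one) := by
        funext t x
        by_cases hx : PySem.Int.band x ((1:Int) <<< i) ≠ 0
        · rw [if_pos hx, if_pos ((pv_band_two_pow x i).mp hx)]
        · rw [if_neg hx, if_neg (fun hc => hx ((pv_band_two_pow x i).mpr hc))]
      rw [hfun, PySem.List.foldl_count_if]
      simp
    simp only [hinner]
    rw [PySem.List.foldl_add (List.range 32)
      (fun i => (↑(arr.countP (fun x => pvBit x i)) : Int)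
        * ((arr.length : Int) - ↑(arr.countP (fun x => pvBit x i))) * 2) 0]
    simp
  have hB0 : different_bits_sum_s_s_alt arr
      = (arr.map (fun a =>
          (arr.map (fun b =>
            ((List.range 32).map (fun i => if (pvBit a i != pvBit b i) then (1:Int) else 0)).sum)).sum)).sum := by
    unfold different_bits_sum_s_s_alt
    simp only [PySem.List.foldl_add, zero_add]
    simp only [pv_popcount_spread, pv_bxor_bit]
  have hB : different_bits_sum_s_s_alt arr
      = ((List.range 32).map (fun i =>
          (arr.map (fun a =>
            (arr.map (fun b => if (pvBit a i != pvBit b i) then (1:Int) else 0)).sum)).sum)).sum := by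
    rw [hB0]
    rw [show (fun (a : Int) =>
          (arr.map (fun b =>
            ((List.range 32).map (fun i => if (pvBit a i != pvBit b i) then (1:Int) else 0)).sum)).sum)
        = (fun (a : Int) =>
          ((List.range 32).map (fun i =>
            (arr.map (fun b => if (pvBit a i != pvBit b i) then (1:Int) else 0)).sum)).sum) from
      funext (fun a => pv_sum_swap (fun b i => if (pvBit a i != pvBit b i) then (1:Int) else 0) arr (List.range 32))]
    exact pv_sum_swap
      (fun a i => (arr.map (fun b => if (pvBit a i != pvBit b i) then (1:Int) else 0)).sum)
      arr (List.range 32)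
  rw [hA, hB]
  congr 1
  refine List.map_congr_left (fun i _ => ?_)
  set C := arr.countP (fun x => pvBit x i) with hC
  have hCle : C ≤ arr.length := List.countP_le_length
  have hsumb : ∀ a : Int,
      (arr.map (fun b => if (pvBit a i != pvBit b i) then (1:Int) else 0)).sum
      = if pvBit a i then ((arr.length - C : Nat) : Int) else (C : Int) := by
    intro a
    rw [PySem.List.sum_map_ite_one_zero (fun b => (pvBit a i != pvBit b i)) arr]
    cases hpa : pvBit a i
    · simp only [Bool.false_bne, if_false, Bool.false_eq_true]
      rfl
    · simp only [Bool.true_bne, if_true]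
      exact congrArg _ (pv_countP_not arr (fun x => pvBit x i))
  rw [show (fun a => (arr.map (fun b => if (pvBit a i != pvBit b i) then (1:Int) else 0)).sum)
      = (fun a => if pvBit a i then ((arr.length - C : Nat) : Int) else (C : Int)) from funext hsumb]
  rw [pv_sum_ite (fun a => pvBit a i) _ _ arr]
  rw [← hC]
  push_cast [Nat.cast_sub hCle]
  ring

-- ===== VERDICT (by name: the statement is the Claim_ definition above) =====
theorem different_bits_sum_s_s_spec : Claim_equal_different_bits_sum_s_s := by
  intro arr _
  exact pv_main arr
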